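-- pv_equiv track=rewrite | github.com/tuikhongtenbo/Phoneme_NMT | src/evaluation/meteor.py | _exact_match_alignment
-- ===== SOURCE A (Python) =====
-- from typing import List, Dict, Union, Set, Tuple
--
-- def _exact_match_alignment(ref_tokens: List[str], hyp_tokens: List[str]) -> List[Tuple[int, int]]:
--     """
--     Create alignment based on exact string matching.
--     Args:
--         ref_tokens (List[str]): List of reference tokens
--         hyp_tokens (List[str]): List of hypothesis tokens
--
--     Returns:
--         List[Tuple[int, int]]: List of (ref_idx, hyp_idx) alignment pairs
--     """
--     alignments = []
--     ref_matched = set()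
--     hyp_matched = set()
--
--     # Greedy alignment: for each hypothesis word, find first unmatched reference word
--     for i, hyp_token in enumerate(hyp_tokens):
--         for j, ref_token in enumerate(ref_tokens):
--             if j not in ref_matched and i not in hyp_matched and hyp_token == ref_token:
--                 alignments.append((j, i))
--                 ref_matched.add(j)
--                 hyp_matched.add(i)
--                 break
--
--     return alignments
-- ===== SOURCE B (Python) =====
-- def _exact_match_alignment(ref_tokens, hyp_tokens):
--     # Index each reference token to its (increasing) list of positions once,
--     # then consume the smallest unused position per hypothesis token.
--     pos = {}
--     for j, tok in enumerate(ref_tokens):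
--         pos.setdefault(tok, []).append(j)
--     alignments = []
--     for i, tok in enumerate(hyp_tokens):
--         lst = pos.get(tok)
--         if lst:
--             alignments.append((lst.pop(0), i))
--     return alignments
-- ===== Notes on version B (the rewrite author's own statement) =====
-- stated objective: faster
-- what changed: Replaced the per-hypothesis-token linear rescan of ref_tokens (with matched-index sets) by a dict built once mapping each token to its increasing list of reference positions, from which each hypothesis token consumes the smallest unused position.
import Mathlib
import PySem

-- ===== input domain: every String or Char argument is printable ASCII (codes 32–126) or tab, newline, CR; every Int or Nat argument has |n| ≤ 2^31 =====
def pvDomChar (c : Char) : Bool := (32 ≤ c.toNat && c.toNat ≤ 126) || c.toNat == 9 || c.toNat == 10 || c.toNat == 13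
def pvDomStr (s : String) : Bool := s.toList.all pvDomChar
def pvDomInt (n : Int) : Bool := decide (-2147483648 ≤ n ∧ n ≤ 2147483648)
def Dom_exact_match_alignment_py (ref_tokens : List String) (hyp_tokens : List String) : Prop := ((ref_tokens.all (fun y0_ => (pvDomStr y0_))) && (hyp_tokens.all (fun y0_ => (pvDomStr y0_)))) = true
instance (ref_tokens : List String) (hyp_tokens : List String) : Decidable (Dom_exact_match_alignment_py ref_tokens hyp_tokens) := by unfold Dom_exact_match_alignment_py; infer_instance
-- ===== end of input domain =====

-- B replaces A's per-hypothesis-token rescan of ref_tokens by a dict token → list of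
-- reference positions built once, consuming the smallest unused position (objective: faster).

-- ===== PORT A =====
-- loop body of A's outer 'for i, hyp_token in enumerate(hyp_tokens)'; the inner
-- 'for j, ref_token … break' is the first enumerate-pair satisfying the condition (find?)
def pvStepA (ref_tokens : List String)
    (st : List (Int × Int) × PySem.Set Int × PySem.Set Int) (p : Int × String) :
    List (Int × Int) × PySem.Set Int × PySem.Set Int :=
  match (PySem.List.enumerate ref_tokens).find?
      (fun q => !(PySem.Set.contains st.2.1 q.1) && !(PySem.Set.contains st.2.2 p.1) && p.2 == q.2) with
  | some q => (st.1 ++ [(q.1, p.1)], PySem.Set.add st.2.1 q.1, PySem.Set.add st.2.2 p.1)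
  | none => st

def exact_match_alignment_py (ref_tokens : List String) (hyp_tokens : List String) : List (Int × Int) :=
  ((PySem.List.enumerate hyp_tokens).foldl (pvStepA ref_tokens)
    ([], PySem.Set.empty, PySem.Set.empty)).1

-- ===== PORT B =====
-- pos.setdefault(tok, []).append(j)  ==  pos[tok] = pos.get(tok, []) + [j]
def pvBuildPos (ref_tokens : List String) : PySem.Dict String (List Int) :=
  (PySem.List.enumerate ref_tokens).foldl
    (fun d p => d.modify p.2 [] (fun l => l ++ [p.1])) PySem.Dict.empty

-- loop body of B's 'for i, tok in enumerate(hyp_tokens)': lst = pos.get(tok); if lst: … lst.pop(0)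
def pvStepB (st : List (Int × Int) × PySem.Dict String (List Int)) (p : Int × String) :
    List (Int × Int) × PySem.Dict String (List Int) :=
  match st.2.get? p.2 with
  | some (j :: rest) => (st.1 ++ [(j, p.1)], st.2.insert p.2 rest)
  | _ => st

def exact_match_alignment_py_alt (ref_tokens : List String) (hyp_tokens : List String) : List (Int × Int) :=
  ((PySem.List.enumerate hyp_tokens).foldl pvStepB ([], pvBuildPos ref_tokens)).1

-- ===== PRECONDITION & SPEC =====
def Spec_exact_match_alignment_py (ref_tokens : List String) (hyp_tokens : List String) (out : List (Int × Int)) : Prop := out = exact_match_alignment_py_alt ref_tokens hyp_tokens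
instance (ref_tokens : List String) (hyp_tokens : List String) (out : List (Int × Int)) : Decidable (Spec_exact_match_alignment_py ref_tokens hyp_tokens out) := by unfold Spec_exact_match_alignment_py; infer_instance

-- ===== CLAIM (what is proved, stated in full; the proofs are below) =====
def Claim_equal_exact_match_alignment_py : Prop := ∀ (ref_tokens : List String) (hyp_tokens : List String), Dom_exact_match_alignment_py ref_tokens hyp_tokens → Spec_exact_match_alignment_py ref_tokens hyp_tokens (exact_match_alignment_py ref_tokens hyp_tokens)

-- ===== LEMMAS AND PROOFS =====

-- the reference pairs with token t whose index is not yet matched (in position order)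
def pvFilt (ref_tokens : List String) (S : PySem.Set Int) (t : String) : List (Int × String) :=
  (PySem.List.enumerate ref_tokens).filter (fun q => !(PySem.Set.contains S q.1) && t == q.2)

lemma pvContains_add (S : PySem.Set Int) (x y : Int) :
    PySem.Set.contains (PySem.Set.add S y) x = (PySem.Set.contains S x || x == y) := by
  apply Bool.eq_iff_iff.mpr; simp [PySem.Set.mem_add]
lemma pvNodupFst (ref_tokens : List String) :
    ((PySem.List.enumerate ref_tokens).map (·.1)).Nodup := by
  rw [PySem.List.map_fst_enumerate]; exact PySem.List.nodup_pyRange_one _ _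

-- first injectivity on enumerate
lemma pvFstInj (ref : List String) {p q : Int × String}
    (hp : p ∈ PySem.List.enumerate ref) (hq : q ∈ PySem.List.enumerate ref) (h : p.1 = q.1) : p = q := by
  have hn := pvNodupFst ref
  have := List.inj_on_of_nodup_map hn hp hq h
  exact this

lemma pvBuild_getD (l : List (Int × String)) (d : PySem.Dict String (List Int)) (t : String) :
    (l.foldl (fun d p => d.modify p.2 [] (fun l => l ++ [p.1])) d).getD t []
      = d.getD t [] ++ (l.filter (fun q => t == q.2)).map (·.1) := by
  induction l generalizing d with
  | nil => simp
  | cons p l ih =>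
    simp only [List.foldl_cons, ih, List.filter_cons]
    rw [PySem.Dict.getD_modify]
    by_cases h : t = p.2
    · simp [h]
    · simp [h, (by simp [h] : (t == p.2) = false)]

lemma pvInit_inv (ref_tokens : List String) (t : String) :
    (pvBuildPos ref_tokens).getD t [] = (pvFilt ref_tokens PySem.Set.empty t).map (·.1) := by
  unfold pvBuildPos
  rw [pvBuild_getD]
  simp only [PySem.Dict.getD_empty, List.nil_append]
  unfold pvFilt
  congr 1

lemma pvMain (ref_tokens hyp_tokens : List String) (s : Int)
    (als : List (Int × Int)) (S H : PySem.Set Int) (pos : PySem.Dict String (List Int))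
    (hInv : ∀ t, pos.getD t [] = (pvFilt ref_tokens S t).map (·.1))
    (hH : ∀ x ∈ H, x < s) :
    ((PySem.List.enumerate hyp_tokens s).foldl (pvStepA ref_tokens) (als, S, H)).1
      = ((PySem.List.enumerate hyp_tokens s).foldl pvStepB (als, pos)).1 := by
  induction hyp_tokens generalizing s als S H pos with
  | nil => simp [PySem.List.enumerate]
  | cons ht tl ih =>
    rw [PySem.List.enumerate_cons, List.foldl_cons, List.foldl_cons]
    have hHs : PySem.Set.contains H s = false := by
      cases hc : PySem.Set.contains H s
      · rfl
      · exact absurd (hH s (by simpa using hc)) (lt_irrefl s)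
    have hstepA : pvStepA ref_tokens (als, S, H) (s, ht) =
        match (pvFilt ref_tokens S ht).head? with
        | some q => (als ++ [(q.1, s)], PySem.Set.add S q.1, PySem.Set.add H s)
        | none => (als, S, H) := by
      unfold pvStepA pvFilt
      rw [← List.head?_filter]
      simp only [hHs, Bool.not_false, Bool.and_true]
    cases hfl : (pvFilt ref_tokens S ht).head? with
    | none =>
      have hnil : pvFilt ref_tokens S ht = [] := List.head?_eq_none_iff.mp hfl
      have hB : pvStepB (als, pos) (s, ht) = (als, pos) := by
        unfold pvStepB
        have : pos.getD ht [] = [] := by rw [hInv, hnil]; rfl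
        rw [PySem.Dict.getD_eq_get?_getD] at this
        cases hg : pos.get? ht with
        | none => simp
        | some l =>
          rw [hg] at this; simp at this; subst this; simp
      rw [hstepA, hfl, hB]
      exact ih (s+1) als S H pos hInv (fun x hx => lt_trans (hH x hx) (by omega))
    | some e =>
      obtain ⟨es, hcons⟩ : ∃ es, pvFilt ref_tokens S ht = e :: es :=
        List.head?_eq_some_iff.mp hfl
      -- facts about e
      have heMem : e ∈ pvFilt ref_tokens S ht := by rw [hcons]; exact List.mem_cons_self
      have hePred := List.of_mem_filter heMem
      have heEnum : e ∈ PySem.List.enumerate ref_tokens := List.mem_of_mem_filter heMem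
      have heTok : e.2 = ht := by
        have : (ht == e.2) = true := by
          simp only [Bool.and_eq_true] at hePred; exact hePred.2
        exact (eq_of_beq this).symm
      have hgd : pos.getD ht [] = e.1 :: es.map (·.1) := by rw [hInv, hcons]; rfl
      have hget : pos.get? ht = some (e.1 :: es.map (·.1)) := by
        rw [PySem.Dict.getD_eq_get?_getD] at hgd
        cases hg : pos.get? ht with
        | none => rw [hg] at hgd; simp at hgd
        | some l => rw [hg] at hgd; simp at hgd; rw [hgd]
      have hB : pvStepB (als, pos) (s, ht) = (als ++ [(e.1, s)], pos.insert ht (es.map (·.1))) := by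
        unfold pvStepB; rw [hget]
      rw [hstepA, hfl, hB]
      -- nodup of fst within the filter
      have hnd : ((pvFilt ref_tokens S ht).map (·.1)).Nodup := by
        unfold pvFilt
        exact (List.Sublist.map (Prod.fst) List.filter_sublist).nodup (pvNodupFst ref_tokens)
      have hesNe : ∀ q ∈ es, q.1 ≠ e.1 := by
        have hnm : e.1 ∉ es.map (·.1) := by
          rw [hcons] at hnd
          simp only [List.map_cons, List.nodup_cons] at hnd
          exact hnd.1
        intro q hq hq1
        exact hnm (hq1 ▸ List.mem_map_of_mem hq)
      -- new invariant
      have hInv' : ∀ t, (pos.insert ht (es.map (·.1))).getD t []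
          = (pvFilt ref_tokens (PySem.Set.add S e.1) t).map (·.1) := by
        intro t
        by_cases hteq : t = ht
        · subst hteq
          rw [PySem.Dict.getD_insert, if_pos rfl]
          have : pvFilt ref_tokens (PySem.Set.add S e.1) t = es := by
            unfold pvFilt
            have h1 : (PySem.List.enumerate ref_tokens).filter
                (fun q => !(PySem.Set.contains (PySem.Set.add S e.1) q.1) && t == q.2)
                = ((PySem.List.enumerate ref_tokens).filter
                    (fun q => !(PySem.Set.contains S q.1) && t == q.2)).filter
                    (fun q => !(q.1 == e.1)) := by
              rw [List.filter_filter]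
              apply List.filter_congr
              intro q _
              rw [pvContains_add]
              cases PySem.Set.contains S q.1 <;> cases hqe : (q.1 == e.1) <;>
                cases (t == q.2) <;> simp
            rw [h1]
            show (pvFilt ref_tokens S t).filter _ = es
            rw [hcons, List.filter_cons]
            have hc : (!(e.1 == e.1)) = false := by simp
            simp only [hc, Bool.false_eq_true, if_false]
            apply List.filter_eq_self.mpr
            intro q hq
            simp only [Bool.not_eq_eq_eq_not, Bool.not_true, beq_eq_false_iff_ne, ne_eq]
            exact hesNe q hq
          rw [this]
        · rw [PySem.Dict.getD_insert, if_neg hteq, hInv]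
          congr 1
          unfold pvFilt
          apply List.filter_congr
          intro q hqEnum
          rw [pvContains_add]
          cases htq : (t == q.2)
          · simp
          · have hq2 : q.2 = t := (eq_of_beq htq).symm
            have hqe1 : (q.1 == e.1) = false := by
              apply beq_eq_false_iff_ne.mpr
              intro h1
              have := pvFstInj ref_tokens hqEnum heEnum h1
              rw [← this] at heTok
              exact hteq (hq2 ▸ heTok ▸ rfl)
            simp [hqe1]
      exact ih (s+1) (als ++ [(e.1, s)]) (PySem.Set.add S e.1) (PySem.Set.add H s)
        (pos.insert ht (es.map (·.1))) hInv'
        (by intro x hx; rcases (PySem.Set.mem_add H s x).mp hx with h | h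
            · exact lt_trans (hH x h) (by omega)
            · omega)

-- ===== VERDICT (by name: the statement is the Claim_ definition above) =====
theorem exact_match_alignment_py_spec : Claim_equal_exact_match_alignment_py := by
  intro ref hyp _
  unfold Spec_exact_match_alignment_py exact_match_alignment_py exact_match_alignment_py_alt
  exact pvMain ref hyp 0 [] PySem.Set.empty PySem.Set.empty (pvBuildPos ref)
    (fun t => pvInit_inv ref t) (by intro x hx; cases hx)
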